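-- pv_equiv track=rewrite | github.com/jhmarryme/Python-in-action | inbox/2024_company_algorithm/A_是不是树/entry.py | solve
-- ===== SOURCE A (Python) =====
-- def solve(a: list, size: int) -> bool:
--     from collections import defaultdict
--
--     if size == 0:
--         return False
--
--     if size % 2 != 0:
--         return False
--
--     pairs = [(a[i], a[i + 1]) for i in range(0, size, 2)]
--
--     if len(pairs) == 1:
--         p, c = pairs[0]
--         if p == c:
--             return True
--         else:
--             return True
--
--     else:
--         for p, c in pairs:
--             if p == c:
--                 return False
--
--         unique_nodes = set()
--         in_degree = defaultdict(int)
--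
--         for p, c in pairs:
--             unique_nodes.add(p)
--             unique_nodes.add(c)
--             in_degree[c] += 1
--
--         num_edges = len(pairs)
--
--         expected_nodes = num_edges + 1
--
--         if len(unique_nodes) != expected_nodes:
--             return False
--
--         roots = [node for node in unique_nodes if in_degree[node] == 0]
--
--         if len(roots) != 1:
--             return False
--
--         root = roots[0]
--
--         for node in unique_nodes:
--             if node == root:
--                 continue
--             if in_degree[node] != 1:
--                 return False
--
--         node_list = list(unique_nodes)
--         node_index = {node: i for i, node in enumerate(node_list)}
--         parent_array = [i for i in range(len(node_list))]
--
--         def find(u):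
--             while parent_array[u] != u:
--                 parent_array[u] = parent_array[parent_array[u]]
--                 u = parent_array[u]
--             return u
--
--         def union(u, v):
--             pu = find(u)
--             pv = find(v)
--             if pu == pv:
--                 return False
--             parent_array[pu] = pv
--             return True
--
--         for p, c in pairs:
--             u = node_index[p]
--             v = node_index[c]
--             if not union(u, v):
--                 return False
--
--         root_rep = find(0)
--         for i in range(1, len(node_list)):
--             if find(i) != root_rep:
--                 return False
--
--         return True
-- ===== SOURCE B (Python) =====
-- def solve(a: list, size: int) -> bool:
--     if size == 0:
--         return False
--     if size % 2 != 0: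
--         return False
--
--     pairs = [(a[i], a[i + 1]) for i in range(0, size, 2)]
--
--     if len(pairs) == 1:
--         p, c = pairs[0]
--         # intended fix: a single self-loop edge is not a tree
--         return p != c
--
--     if any(p == c for p, c in pairs):
--         return False
--
--     nodes = set()
--     in_degree = {}
--     parent = {}
--     for p, c in pairs:
--         nodes.add(p)
--         nodes.add(c)
--         in_degree[c] = in_degree.get(c, 0) + 1
--         parent[c] = p
--
--     n = len(nodes)
--     if n != len(pairs) + 1:
--         return False
--
--     roots = [v for v in nodes if in_degree.get(v, 0) == 0]
--     if len(roots) != 1: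
--         return False
--     root = roots[0]
--
--     for v in nodes:
--         if v != root and in_degree.get(v, 0) != 1:
--             return False
--
--     # every node must reach the root by walking parent pointers
--     for v in nodes:
--         u, steps = v, 0
--         while u != root and steps < n:
--             u = parent[u]
--             steps += 1
--         if u != root:
--             return False
--     return True
-- ===== Notes on version B (the rewrite author's own statement) =====
-- stated objective: alternative
-- what changed: The union-find forest with path halving plus the final all-same-representative scan is replaced by a parent dictionary (child -> parent) and a walk up the parent chain from every node, checking each reaches the unique root; the degree-validation prefix is kept.
-- intended difference: On a single-pair input whose edge is a self-loop (size == 2 and a[0] == a[1]) A returns True (its one-pair branch returns True on both sides of the p == c test), while B returns False, consistent with A's own self-loop -> False rule for larger inputs; a self-loop is not a tree, so False is the intended value. — e.g. on solve([5, 5], 2): A returns true, B returns false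
import Mathlib
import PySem

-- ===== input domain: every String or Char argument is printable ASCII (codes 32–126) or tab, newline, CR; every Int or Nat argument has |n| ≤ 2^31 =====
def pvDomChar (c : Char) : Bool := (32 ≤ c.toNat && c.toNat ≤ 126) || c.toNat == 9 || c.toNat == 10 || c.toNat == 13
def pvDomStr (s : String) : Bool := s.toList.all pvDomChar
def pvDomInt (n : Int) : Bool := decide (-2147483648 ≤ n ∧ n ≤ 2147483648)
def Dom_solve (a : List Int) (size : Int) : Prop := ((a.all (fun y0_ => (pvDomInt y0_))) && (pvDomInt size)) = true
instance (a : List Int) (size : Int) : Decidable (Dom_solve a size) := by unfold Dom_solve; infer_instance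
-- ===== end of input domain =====

-- B replaces A's union-find (path halving + final same-representative scan) by a
-- parent dictionary and a walk up the parent chain from every node; the degree
-- validation prefix is kept.  On a single self-loop pair A returns True, B returns
-- False (intended difference, see D_solve).

-- ===== PORT A =====

-- for p, c in pairs: if p == c: return False
def selfLoopA : List (Int × Int) → Bool
  | [] => false
  | e :: rest => if e.1 = e.2 then true else selfLoopA rest

-- the loop building unique_nodes (a set) and in_degree (a defaultdict(int))
def buildA (pairs : List (Int × Int)) : PySem.Set Int × PySem.Dict Int Int :=
  pairs.foldl
    (fun st e =>
      (PySem.Set.add (PySem.Set.add st.1 e.1) e.2, st.2.modify e.2 0 (· + 1)))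
    (PySem.Set.empty, PySem.Dict.empty)

-- for node in unique_nodes: if node == root: continue; if in_degree[node] != 1: return False
def degChkA (deg : PySem.Dict Int Int) (root : Int) : List Int → Bool
  | [] => true
  | v :: rest =>
    if v = root then degChkA deg root rest
    else if deg.getD v 0 ≠ 1 then false else degChkA deg root rest

-- node_index = {node: i for i, node in enumerate(node_list)}
def buildIndexA (nodes : List Int) : PySem.Dict Int Int :=
  (PySem.List.enumerate nodes 0).foldl (fun d iv => d.insert iv.2 iv.1) PySem.Dict.empty

-- def find(u): while parent_array[u] != u: parent_array[u] = parent_array[parent_array[u]]; u = parent_array[u]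
-- (fuel bounds the while loop; arr.length iterations always suffice on the states A reaches)
def ufFind : List Int → Int → Nat → List Int × Int
  | arr, u, 0 => (arr, u)
  | arr, u, fuel + 1 =>
    if PySem.List.pyGetD arr u 0 ≠ u then
      let g := PySem.List.pyGetD arr (PySem.List.pyGetD arr u 0) 0
      ufFind (PySem.List.pySetD arr u g) g fuel
    else (arr, u)

-- def union(u, v): pu = find(u); pv = find(v); if pu == pv: return False; parent_array[pu] = pv; return True
def ufUnion (arr : List Int) (u v : Int) : List Int × Bool :=
  let fu := ufFind arr u arr.length
  let fv := ufFind fu.1 v fu.1.length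
  if fu.2 = fv.2 then (fv.1, false) else (PySem.List.pySetD fv.1 fu.2 fv.2, true)

-- for p, c in pairs: ... if not union(u, v): return False
def ufEdges (nidx : PySem.Dict Int Int) : List (Int × Int) → List Int → Option (List Int)
  | [], arr => some arr
  | e :: rest, arr =>
    let r := ufUnion arr (nidx.getD e.1 0) (nidx.getD e.2 0)
    if r.2 then ufEdges nidx rest r.1 else none

-- root_rep = find(0); for i in range(1, len(node_list)): if find(i) != root_rep: return False
def ufCheck (rep : Int) : List Int → List Int → Bool
  | _,  [] => true
  | arr, i :: rest =>
    let f := ufFind arr i arr.length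
    if f.2 ≠ rep then false else ufCheck rep f.1 rest

def solve (a : List Int) (size : Int) : Bool :=
  if size = 0 then false
  else if PySem.Int.mod size 2 ≠ 0 then false
  else
    let pairs := (PySem.List.pyRange 0 size 2).map
      (fun i => (PySem.List.pyGetD a i 0, PySem.List.pyGetD a (i + 1) 0))
    if pairs.length = 1 then
      let e := PySem.List.pyGetD pairs 0 (0, 0)
      if e.1 = e.2 then true else true
    else
      if selfLoopA pairs then false
      else
        let st := buildA pairs
        if PySem.Set.len st.1 ≠ pairs.length + 1 then false
        else
          let roots := st.1.filter (fun v => st.2.getD v 0 = 0)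
          if roots.length ≠ 1 then false
          else
            let root := PySem.List.pyGetD roots 0 0
            if degChkA st.2 root st.1 then
              let nidx := buildIndexA st.1
              let arr0 := PySem.List.pyRange 0 (PySem.Set.len st.1 : Int) 1
              match ufEdges nidx pairs arr0 with
              | none => false
              | some arr1 =>
                let f0 := ufFind arr1 0 arr1.length
                ufCheck f0.2 f0.1 (PySem.List.pyRange 1 (PySem.Set.len st.1 : Int) 1)
            else false

-- ===== PORT B =====

-- the loop building nodes (a set), in_degree (a dict via .get) and parent (a dict)
def buildB (pairs : List (Int × Int)) :
    PySem.Set Int × PySem.Dict Int Int × PySem.Dict Int Int :=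
  pairs.foldl
    (fun st e =>
      (PySem.Set.add (PySem.Set.add st.1 e.1) e.2,
       st.2.1.insert e.2 (st.2.1.getD e.2 0 + 1),
       st.2.2.insert e.2 e.1))
    (PySem.Set.empty, PySem.Dict.empty, PySem.Dict.empty)

-- u, steps = v, 0; while u != root and steps < n: u = parent[u]; steps += 1
def walkB (parent : PySem.Dict Int Int) (root : Int) : Int → Nat → Int
  | u, 0 => u
  | u, fuel + 1 => if u ≠ root then walkB parent root (parent.getD u 0) fuel else u

def solve_alt (a : List Int) (size : Int) : Bool :=
  if size = 0 then false
  else if PySem.Int.mod size 2 ≠ 0 then false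
  else
    let pairs := (PySem.List.pyRange 0 size 2).map
      (fun i => (PySem.List.pyGetD a i 0, PySem.List.pyGetD a (i + 1) 0))
    if pairs.length = 1 then
      let e := PySem.List.pyGetD pairs 0 (0, 0)
      decide (e.1 ≠ e.2)
    else
      if pairs.any (fun e => e.1 = e.2) then false
      else
        let st := buildB pairs
        if PySem.Set.len st.1 ≠ pairs.length + 1 then false
        else
          let roots := st.1.filter (fun v => st.2.1.getD v 0 = 0)
          if roots.length ≠ 1 then false
          else
            let root := PySem.List.pyGetD roots 0 0
            if st.1.all (fun v => decide (v = root ∨ st.2.1.getD v 0 = 1)) then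
              st.1.all (fun v => walkB st.2.2 root v (PySem.Set.len st.1).toNat == root)
            else false

-- ===== PRECONDITION & SPEC =====
-- Pre_ excludes only the inputs where A raises IndexError: a positive even size
-- larger than len(a) makes the pair comprehension read past the end of a.
def Pre_solve (a : List Int) (size : Int) : Prop :=
  PySem.Int.mod size 2 = 0 → 0 < size → size ≤ (a.length : Int)
instance (a : List Int) (size : Int) : Decidable (Pre_solve a size) := by
  unfold Pre_solve; infer_instance

def pvWitness_solve : List Int × Int := ([1, 2, 1, 3], 4)

-- On a single-pair input whose edge is a self-loop (size == 2 and a[0] == a[1]) A returns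
-- True (its one-pair branch returns True on both sides of the p == c test), while B returns
-- False, consistent with A's own self-loop → False rule — a self-loop is not a tree.
def D_solve (a : List Int) (size : Int) : Prop :=
  size = 2 ∧ 2 ≤ a.length ∧ a.getD 0 0 = a.getD 1 0
instance (a : List Int) (size : Int) : Decidable (D_solve a size) := by
  unfold D_solve; infer_instance

def Spec_solve (a : List Int) (size : Int) (out : Bool) : Prop :=
  ¬ D_solve a size → out = solve_alt a size
instance (a : List Int) (size : Int) (out : Bool) : Decidable (Spec_solve a size out) := by
  unfold Spec_solve; infer_instance

def pvDiffWitness_solve : List Int × Int := ([5, 5], 2)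
def pvDiffWitnessOut_solve : Bool × Bool := (true, false)

-- ===== CLAIM (what is proved, stated in full; the proofs are below) =====
def Claim_unchanged_solve : Prop :=
  ∀ (a : List Int) (size : Int), Dom_solve a size → Pre_solve a size →
    Spec_solve a size (solve a size)
def Claim_changed_solve : Prop :=
  Dom_solve (pvDiffWitness_solve.1) (pvDiffWitness_solve.2) ∧
  Pre_solve (pvDiffWitness_solve.1) (pvDiffWitness_solve.2) ∧
  D_solve (pvDiffWitness_solve.1) (pvDiffWitness_solve.2) ∧
  solve (pvDiffWitness_solve.1) (pvDiffWitness_solve.2) = pvDiffWitnessOut_solve.1 ∧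
  solve_alt (pvDiffWitness_solve.1) (pvDiffWitness_solve.2) = pvDiffWitnessOut_solve.2 ∧
  pvDiffWitnessOut_solve.1 ≠ pvDiffWitnessOut_solve.2
def Claim_exact_solve : Prop :=
  ∀ (a : List Int) (size : Int), Dom_solve a size → Pre_solve a size →
    D_solve a size → solve a size ≠ solve_alt a size

-- ===== LEMMAS AND PROOFS =====

-- ---------- generic list/fold helpers ----------

theorem foldl_pair {A B C : Type} (f : A → C → A) (g : B → C → B) :
    ∀ (l : List C) (x : A) (y : B),
      l.foldl (fun st e => (f st.1 e, g st.2 e)) (x, y) = (l.foldl f x, l.foldl g y) := by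
  intro l
  induction l with
  | nil => intro x y; rfl
  | cons e rest ih => intro x y; simp [List.foldl, ih]

-- ---------- value-level graph notions ----------

def chd (E : List (Int × Int)) : List Int := E.map Prod.snd

def degE (E : List (Int × Int)) (v : Int) : Nat := (chd E).count v

def parOf (E : List (Int × Int)) (c : Int) : Option Int :=
  (E.find? (fun e => e.2 == c)).map Prod.fst

def iterP (E : List (Int × Int)) : Nat → Int → Option Int
  | 0, v => some v
  | k + 1, v => (parOf E v).bind (iterP E k)

def ReachE (E : List (Int × Int)) (root v : Int) : Prop :=
  ∃ k, iterP E k v = some root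

def Adj (P : List (Int × Int)) (x y : Int) : Prop := (x, y) ∈ P ∨ (y, x) ∈ P

def Conn (P : List (Int × Int)) : Int → Int → Prop := Relation.ReflTransGen (Adj P)

-- context established by the degree-validation prefix
structure Ctx (E : List (Int × Int)) (N : List Int) (root : Int) : Prop where
  nodup : N.Nodup
  memN : ∀ v, v ∈ N ↔ (∃ e ∈ E, e.1 = v ∨ e.2 = v)
  hn : N.length = E.length + 1
  hsl : ∀ e ∈ E, e.1 ≠ e.2
  rootmem : root ∈ N
  rootdeg : degE E root = 0
  hdeg1 : ∀ v ∈ N, v ≠ root → degE E v = 1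
  rootuniq : ∀ v ∈ N, degE E v = 0 → v = root

theorem ctx_edge_mem {E : List (Int × Int)} {N : List Int} {root : Int} (h : Ctx E N root) {e : Int × Int} (he : e ∈ E) :
    e.1 ∈ N ∧ e.2 ∈ N := by
  constructor
  · exact (h.memN e.1).2 ⟨e, he, Or.inl rfl⟩
  · exact (h.memN e.2).2 ⟨e, he, Or.inr rfl⟩

theorem mem_chd {E : List (Int × Int)} {c : Int} : c ∈ chd E ↔ ∃ e ∈ E, e.2 = c := by
  simp [chd]

theorem ctx_chd_nodup {E : List (Int × Int)} {N : List Int} {root : Int} (h : Ctx E N root) : (chd E).Nodup := by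
  rw [List.nodup_iff_count_le_one]
  intro c
  by_cases hc : c ∈ chd E
  · obtain ⟨e, he, h2⟩ := mem_chd.1 hc
    have hcN : c ∈ N := (h.memN c).2 ⟨e, he, Or.inr h2⟩
    have hcr : c ≠ root := by
      intro hr
      have : degE E c = 0 := hr ▸ h.rootdeg
      rw [degE, List.count_eq_zero] at this
      exact this hc
    have := h.hdeg1 c hcN hcr
    rw [degE] at this
    omega
  · rw [List.count_eq_zero.2 hc]; omega

theorem par_of_mem {E : List (Int × Int)} {N : List Int} {root : Int} (h : Ctx E N root) {p c : Int} (he : (p, c) ∈ E) :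
    parOf E c = some p := by
  have hsome : (E.find? (fun e => e.2 == c)).isSome := by
    rw [List.find?_isSome]
    exact ⟨(p, c), he, by simp⟩
  obtain ⟨e', he'⟩ := Option.isSome_iff_exists.1 hsome
  have hmem := List.mem_of_find?_eq_some he'
  have hpred := List.find?_some he'
  simp at hpred
  have hinj := List.inj_on_of_nodup_map (ctx_chd_nodup h) (x := e') (y := (p, c))
  have : e' = (p, c) := hinj hmem he (by simpa using hpred)
  rw [parOf, he', this]
  rfl

theorem mem_of_par {E : List (Int × Int)} {c p : Int} (h : parOf E c = some p) :
    (p, c) ∈ E := by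
  rw [parOf] at h
  obtain ⟨e', he', hp⟩ := Option.map_eq_some_iff.1 h
  have hmem := List.mem_of_find?_eq_some he'
  have hpred := List.find?_some he'
  simp at hpred
  have : e' = (p, c) := by
    cases e'
    simp_all
  rwa [this] at hmem

theorem par_root_none {E : List (Int × Int)} {N : List Int} {root : Int} (h : Ctx E N root) : parOf E root = none := by
  have h0 := h.rootdeg
  rw [degE, List.count_eq_zero] at h0
  rw [parOf, List.find?_eq_none.2]
  · rfl
  · intro e he
    simp
    intro hc
    exact h0 (mem_chd.2 ⟨e, he, hc⟩)

theorem nonroot_par {E : List (Int × Int)} {N : List Int} {root : Int} (h : Ctx E N root) {v : Int} (hv : v ∈ N) (hvr : v ≠ root) :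
    ∃ p, parOf E v = some p ∧ (p, v) ∈ E ∧ p ∈ N := by
  have hd := h.hdeg1 v hv hvr
  have hmem : v ∈ chd E := by
    rw [← List.count_pos_iff]
    rw [degE] at hd
    omega
  obtain ⟨e, he, hc⟩ := mem_chd.1 hmem
  refine ⟨e.1, ?_, ?_, ?_⟩
  · have : (e.1, v) ∈ E := by cases e; simpa [← hc] using he
    exact par_of_mem h this
  · cases e; simpa [← hc] using he
  · exact (ctx_edge_mem h he).1

theorem iterP_add (E : List (Int × Int)) (i j : Nat) (v : Int) :
    iterP E (i + j) v = (iterP E i v).bind (iterP E j) := by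
  induction i generalizing v with
  | zero => simp [iterP]
  | succ i ih =>
    have : i + 1 + j = (i + j) + 1 := by omega
    rw [show i + 1 + j = (i + j) + 1 by omega]
    cases hp : parOf E v with
    | none => simp [iterP, hp]
    | some p => simp [iterP, hp, ih]

theorem conn_symm {P : List (Int × Int)} {x y : Int} (h : Conn P x y) : Conn P y x := by
  have hsym : Symmetric (Adj P) := by
    intro a b hab
    cases hab with
    | inl h1 => exact Or.inr h1
    | inr h1 => exact Or.inl h1
  exact (Relation.ReflTransGen.symmetric hsym) h

theorem conn_cut {P : List (Int × Int)} (Q : Int → Prop)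
    (hresp : ∀ e ∈ P, (Q e.1 ↔ Q e.2)) {x y : Int} (h : Conn P x y) : Q x ↔ Q y := by
  induction h with
  | refl => rfl
  | tail _ hstep ih =>
    rename_i b c _
    refine ih.trans ?_
    cases hstep with
    | inl h1 => exact hresp (b, c) h1
    | inr h1 => exact (hresp (c, b) h1).symm

theorem iterP_mem {E : List (Int × Int)} {N : List Int} {root : Int} (h : Ctx E N root) :
    ∀ (k : Nat) (v w : Int), v ∈ N → iterP E k v = some w → w ∈ N := by
  intro k
  induction k with
  | zero => intro v w hv hw; simp [iterP] at hw; rwa [← hw]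
  | succ k ih =>
    intro v w hv hw
    rw [iterP] at hw
    cases hp : parOf E v with
    | none => rw [hp] at hw; simp at hw
    | some p =>
      rw [hp] at hw
      simp at hw
      exact ih p w (ctx_edge_mem h (mem_of_par hp)).1 hw


theorem edge_child_ne_root {E : List (Int × Int)} {N : List Int} {root : Int} (h : Ctx E N root) {e : Int × Int} (he : e ∈ E) :
    e.2 ≠ root := by
  intro hr
  have h0 := h.rootdeg
  rw [degE, List.count_eq_zero] at h0
  exact h0 (mem_chd.2 ⟨e, he, hr⟩)

theorem reach_iff_par {E : List (Int × Int)} {N : List Int} {root : Int} (h : Ctx E N root)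
    {p c : Int} (he : (p, c) ∈ E) (target : Int) :
    (∃ k, iterP E k c = some target) ↔ c = target ∨ ∃ k, iterP E k p = some target := by
  constructor
  · rintro ⟨k, hk⟩
    cases k with
    | zero => simp [iterP] at hk; exact Or.inl hk
    | succ k =>
      rw [iterP, par_of_mem h he] at hk
      simp at hk
      exact Or.inr ⟨k, hk⟩
  · rintro (rfl | ⟨k, hk⟩)
    · exact ⟨0, rfl⟩
    · refine ⟨k + 1, ?_⟩
      rw [iterP, par_of_mem h he]
      simpa using hk

theorem conn_reach {E : List (Int × Int)} {N : List Int} {root : Int} (h : Ctx E N root) {v : Int} (hc : Conn E v root) :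
    ReachE E root v := by
  have hcut := conn_cut (fun w => ReachE E root w) ?_ hc
  · exact hcut.2 ⟨0, rfl⟩
  · intro e he
    have hcr := edge_child_ne_root h he
    have := reach_iff_par h (p := e.1) (c := e.2) (by cases e; exact he) root
    simp only [ReachE]
    rw [this]
    simp [hcr]

theorem cycle_no_reach {E : List (Int × Int)} {N : List Int} {root : Int} (h : Ctx E N root) {c : Int} {k : Nat}
    (hk : 1 ≤ k) (hc : iterP E k c = some c) : ¬ ReachE E root c := by
  rintro ⟨m, hm⟩
  have hq : ∀ q : Nat, iterP E (q * k) c = some c := by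
    intro q
    induction q with
    | zero => simp [iterP]
    | succ q ih =>
      have : (q + 1) * k = q * k + k := by ring
      rw [this, iterP_add, ih]
      simpa using hc
  have hgt : m < (m + 1) * k := by nlinarith
  have hsplit : (m + 1) * k = m + ((m + 1) * k - m) := by omega
  have hs1 : 1 ≤ (m + 1) * k - m := by omega
  have := hq (m + 1)
  rw [hsplit, iterP_add, hm] at this
  simp at this
  obtain ⟨t, ht⟩ := Nat.exists_eq_add_of_le hs1
  rw [ht] at this
  rw [show 1 + t = t + 1 by omega] at this
  -- iterP (t+1) root = some c is impossible: root has no parent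
  rw [iterP, par_root_none h] at this
  simp at this

theorem reach_bounded {E : List (Int × Int)} {N : List Int} {root : Int} (h : Ctx E N root) {v : Int} (hv : v ∈ N)
    (hr : ReachE E root v) : ∃ k ≤ N.length, iterP E k v = some root := by
  classical
  let k := Nat.find hr
  have hk : iterP E k v = some root := Nat.find_spec hr
  refine ⟨k, ?_, hk⟩
  by_contra hgt
  push_neg at hgt
  -- the first k+1 chain values are distinct members of N
  have htot : ∀ i ≤ k, ∃ w, iterP E i v = some w := by
    intro i hi
    obtain ⟨j, hj⟩ := Nat.exists_eq_add_of_le hi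
    rw [hj, iterP_add] at hk
    cases hw : iterP E i v with
    | none => rw [hw] at hk; simp at hk
    | some w => exact ⟨w, rfl⟩
  have hinj : Set.InjOn (fun i : Fin (k + 1) => (iterP E i.1 v).getD 0)
      (Finset.univ : Finset (Fin (k + 1))) := by
    intro i _ j _ hij
    by_contra hne
    -- wlog i < j
    rcases Nat.lt_or_ge i.1 j.1 with hlt | hge
    · obtain ⟨wi, hwi⟩ := htot i.1 (by omega)
      obtain ⟨wj, hwj⟩ := htot j.1 (by omega)
      simp [hwi, hwj] at hij
      -- iterP (i + (k - j)) v = some root, contradicting minimality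
      have hkj : k = j.1 + (k - j.1) := by omega
      rw [hkj, iterP_add, hwj] at hk
      simp at hk
      have : iterP E (i.1 + (k - j.1)) v = some root := by
        rw [iterP_add, hwi]
        simpa [hij] using hk
      have hlt2 : i.1 + (k - j.1) < k := by omega
      exact Nat.find_min hr hlt2 this
    · rcases Nat.lt_or_ge j.1 i.1 with hlt | hge2
      · obtain ⟨wi, hwi⟩ := htot i.1 (by omega)
        obtain ⟨wj, hwj⟩ := htot j.1 (by omega)
        simp [hwi, hwj] at hij
        have hkj : k = i.1 + (k - i.1) := by omega
        rw [hkj, iterP_add, hwi] at hk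
        simp at hk
        have : iterP E (j.1 + (k - i.1)) v = some root := by
          rw [iterP_add, hwj]
          simpa [hij] using hk
        have hlt2 : j.1 + (k - i.1) < k := by omega
        exact Nat.find_min hr hlt2 this
      · exact hne (Fin.ext (by omega))
  have hmaps : ∀ i ∈ (Finset.univ : Finset (Fin (k + 1))),
      (iterP E i.1 v).getD 0 ∈ N.toFinset := by
    intro i _
    obtain ⟨w, hw⟩ := htot i.1 (by omega)
    simp [hw]
    exact iterP_mem h i.1 v w hv hw
  have hcard := Finset.card_le_card_of_injOn _ hmaps hinj
  simp at hcard
  rw [List.toFinset_card_of_nodup h.nodup] at hcard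
  omega

-- no edge of E connects its endpoints through earlier edges, given AllReach
theorem no_early_conn {E : List (Int × Int)} {N : List Int} {root : Int} (h : Ctx E N root)
    (hall : ∀ v ∈ N, ReachE E root v) {P : List (Int × Int)} {p c : Int}
    (hPE : ∀ e ∈ P, e ∈ E) (he : (p, c) ∈ E) (hnc : ∀ e ∈ P, e.2 ≠ c)
    (hconn : Conn P p c) : False := by
  have hcut := conn_cut (fun w => ∃ k, iterP E k w = some c) ?_ hconn
  · have hQc : ∃ k, iterP E k c = some c := ⟨0, rfl⟩
    have hQp : ∃ k, iterP E k p = some c := hcut.2 hQc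
    obtain ⟨k, hk⟩ := hQp
    cases k with
    | zero =>
      simp [iterP] at hk
      exact h.hsl (p, c) he (by simpa using hk)
    | succ k =>
      -- p reaches c in k+1 steps, and par c = p: a cycle through c
      have hcyc : iterP E (k + 1 + 1) c = some c := by
        rw [iterP, par_of_mem h he]
        simpa using hk
      exact cycle_no_reach h (by omega) hcyc (hall c (ctx_edge_mem h he).2)
  · intro e heP
    have heE := hPE e heP
    have hne := hnc e heP
    have := reach_iff_par h (p := e.1) (c := e.2) (by cases e; exact heE) c
    constructor
    · rintro ⟨k, hk⟩
      exact (this.2 (Or.inr ⟨k, hk⟩))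
    · intro hq
      rcases this.1 hq with h1 | h2
      · exact absurd h1 hne
      · exact h2

-- ---------- B side: the parent dictionary and the walk ----------

theorem parent_fold_untouched {c : Int} :
    ∀ (l : List (Int × Int)) (d : PySem.Dict Int Int), c ∉ chd l →
      (l.foldl (fun (d : PySem.Dict Int Int) e => d.insert e.2 e.1) d).getD c 0 = d.getD c 0 := by
  intro l
  induction l with
  | nil => intro d _; rfl
  | cons e rest ih =>
    intro d hc
    simp [chd] at hc
    rw [List.foldl_cons, ih _ (by simp [chd]; tauto)]
    rw [PySem.Dict.getD_insert_of_ne]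
    intro hcontra
    first
      | exact hc.1 hcontra
      | exact hc.1 hcontra.symm
      | exact hc.2 hcontra
      | exact hc.2 hcontra.symm

theorem parent_fold_getD {p c : Int} :
    ∀ (l : List (Int × Int)) (d : PySem.Dict Int Int), (chd l).Nodup → (p, c) ∈ l →
      (l.foldl (fun (d : PySem.Dict Int Int) e => d.insert e.2 e.1) d).getD c 0 = p := by
  intro l
  induction l with
  | nil => intro d _ hm; simp at hm
  | cons e rest ih =>
    intro d hnd hm
    have hnd' : (chd rest).Nodup := by
      simp [chd] at hnd ⊢
      exact hnd.2
    rcases List.mem_cons.1 hm with heq | hmem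
    · have hcn : c ∉ chd rest := by
        simp [chd] at hnd
        rw [← heq] at hnd
        simpa [chd] using hnd.1
      rw [List.foldl_cons, parent_fold_untouched rest _ hcn, ← heq,
        PySem.Dict.getD_insert_self]
    · rw [List.foldl_cons]
      exact ih _ hnd' hmem

theorem buildB_parent_getD {E : List (Int × Int)} {N : List Int} {root : Int} (h : Ctx E N root) {p c : Int} (he : (p, c) ∈ E) :
    (E.foldl (fun (d : PySem.Dict Int Int) e => d.insert e.2 e.1) PySem.Dict.empty).getD c 0 = p := by
  exact parent_fold_getD E _ (ctx_chd_nodup h) he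

theorem walk_eq_root_iff {E : List (Int × Int)} {N : List Int} {root : Int} (h : Ctx E N root) (d : PySem.Dict Int Int)
    (hd : ∀ v ∈ N, v ≠ root → ∀ p, parOf E v = some p → d.getD v 0 = p) :
    ∀ (fuel : Nat) (v : Int), v ∈ N →
      (walkB d root v fuel = root ↔ ∃ k ≤ fuel, iterP E k v = some root) := by
  intro fuel
  induction fuel with
  | zero =>
    intro v hv
    constructor
    · intro hw; exact ⟨0, le_refl 0, by simp [iterP]; simpa [walkB] using hw⟩
    · rintro ⟨k, hk, hik⟩
      have : k = 0 := by omega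
      rw [this] at hik
      simp [iterP] at hik
      simpa [walkB] using hik
  | succ fuel ih =>
    intro v hv
    by_cases hvr : v = root
    · subst hvr
      simp [walkB]
      exact ⟨0, by omega, rfl⟩
    · obtain ⟨p, hp, hpe, hpN⟩ := nonroot_par h hv hvr
      have hdv : d.getD v 0 = p := hd v hv hvr p hp
      rw [walkB]
      simp only [hvr, ne_eq, not_false_eq_true, if_pos, hdv]
      rw [ih p hpN]
      constructor
      · rintro ⟨k, hk, hik⟩
        refine ⟨k + 1, by omega, ?_⟩
        rw [iterP, hp]
        simpa using hik
      · rintro ⟨k, hk, hik⟩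
        cases k with
        | zero => simp [iterP] at hik; exact absurd hik hvr
        | succ k =>
          rw [iterP, hp] at hik
          simp at hik
          exact ⟨k, by omega, hik⟩

-- ---------- A side: the union-find machine ----------

def geta (arr : List Int) (u : Int) : Int := PySem.List.pyGetD arr u 0

def ValidI (n : Nat) (u : Int) : Prop := 0 ≤ u ∧ u < n

def StepA (arr : List Int) (x y : Int) : Prop := geta arr x ≠ x ∧ y = geta arr x

def ReachesA (arr : List Int) : Int → Int → Prop := Relation.ReflTransGen (StepA arr)

def IsRep (arr : List Int) (r : Int) : Prop := geta arr r = r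

def RootedAt (arr : List Int) (x r : Int) : Prop := ReachesA arr x r ∧ IsRep arr r

def SameRoot (arr : List Int) (x y : Int) : Prop :=
  ∃ r, RootedAt arr x r ∧ RootedAt arr y r

def valN (N : List Int) (u : Int) : Int := N.getD u.toNat 0

def idxI (N : List Int) (x : Int) : Int := (N.idxOf x : Int)

def nreps (arr : List Int) : Nat :=
  (List.range arr.length).countP (fun i : Nat => geta arr (i : Int) == (i : Int))

structure UFInv (N : List Int) (P : List (Int × Int)) (arr : List Int) : Prop where
  len : arr.length = N.length
  rng : ∀ u : Int, ValidI N.length u → ValidI N.length (geta arr u)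
  sound : ∀ u : Int, ValidI N.length u → Conn P (valN N u) (valN N (geta arr u))
  compl : ∀ e ∈ P, SameRoot arr (idxI N e.1) (idxI N e.2)
  pvalid : ∀ e ∈ P, ValidI N.length (idxI N e.1) ∧ ValidI N.length (idxI N e.2)
  acyc : ∃ rank : Int → Nat,
    ∀ u : Int, ValidI N.length u → geta arr u ≠ u → rank u < rank (geta arr u)

theorem idx_valid {N : List Int} {v : Int} (hv : v ∈ N) : ValidI N.length (idxI N v) := by
  refine ⟨by simp [idxI], ?_⟩
  rw [idxI]
  exact_mod_cast List.idxOf_lt_length_of_mem hv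

theorem val_idx {N : List Int} (hnd : N.Nodup) {v : Int} (hv : v ∈ N) :
    valN N (idxI N v) = v := by
  rw [valN, idxI, Int.toNat_natCast,
    List.getD_eq_getElem _ _ (List.idxOf_lt_length_of_mem hv)]
  exact List.getElem_idxOf (List.idxOf_lt_length_of_mem hv)

theorem root_unique {arr : List Int} {x r r' : Int}
    (h1 : RootedAt arr x r) (h2 : RootedAt arr x r') : r = r' := by
  obtain ⟨hr1, hrep1⟩ := h1
  obtain ⟨hr2, hrep2⟩ := h2
  induction hr1 using Relation.ReflTransGen.head_induction_on with
  | refl =>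
    -- x = r is a representative; the chain to r' cannot step
    cases (Relation.ReflTransGen.cases_head hr2) with
    | inl h => exact h
    | inr h =>
      obtain ⟨y, hstep, _⟩ := h
      exact absurd hrep1 hstep.1
  | head hstep htail ih =>
    rename_i a b
    cases (Relation.ReflTransGen.cases_head hr2) with
    | inl h =>
      rw [← h] at hrep2
      exact absurd hrep2 hstep.1
    | inr h =>
      obtain ⟨y, hstep2, htail2⟩ := h
      have hby : b = y := by rw [hstep.2, hstep2.2]
      exact ih (hby ▸ htail2)

theorem rooted_exists_aux {n : Nat} {arr : List Int} (rank : Int → Nat)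
    (hrng : ∀ u : Int, ValidI n u → ValidI n (geta arr u))
    (hrank : ∀ u : Int, ValidI n u → geta arr u ≠ u → rank u < rank (geta arr u)) :
    ∀ (fuelM : Nat) (u : Int), ValidI n u →
      ((Finset.range n).filter (fun i : Nat => rank u < rank (i : Int))).card < fuelM →
      ∃ r, RootedAt arr u r ∧ ValidI n r := by
  intro fuelM
  induction fuelM with
  | zero => intro u _ hm; omega
  | succ fuelM ih =>
    intro u hu hm
    by_cases hrep : geta arr u = u
    · exact ⟨u, ⟨Relation.ReflTransGen.refl, hrep⟩, hu⟩
    · have hu' : ValidI n (geta arr u) := hrng u hu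
      have hlt : rank u < rank (geta arr u) := hrank u hu hrep
      have hss : ((Finset.range n).filter (fun i : Nat => rank (geta arr u) < rank (i : Int))) ⊂
          ((Finset.range n).filter (fun i : Nat => rank u < rank (i : Int))) := by
        constructor
        · intro i hi
          simp [Finset.mem_filter] at hi ⊢
          exact ⟨hi.1, lt_trans hlt hi.2⟩
        · intro hsub
          obtain ⟨hg0, hg1⟩ := hu'
          have hmem : (geta arr u).toNat ∈
              (Finset.range n).filter (fun i : Nat => rank u < rank (i : Int)) :=
            Finset.mem_filter.2 ⟨Finset.mem_range.2 (by omega),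
              by rwa [Int.toNat_of_nonneg hg0]⟩
          have hbad := (Finset.mem_filter.1 (hsub hmem)).2
          rw [Int.toNat_of_nonneg hg0] at hbad
          exact lt_irrefl _ hbad
      have hcard := Finset.card_lt_card hss
      obtain ⟨r, hr, hrv⟩ := ih (geta arr u) hu' (by omega)
      exact ⟨r, ⟨Relation.ReflTransGen.head ⟨hrep, rfl⟩ hr.1, hr.2⟩, hrv⟩

theorem rooted_exists {N : List Int} {P : List (Int × Int)} {arr : List Int} (hI : UFInv N P arr) {u : Int} (hu : ValidI N.length u) :
    ∃ r, RootedAt arr u r ∧ ValidI N.length r := by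
  obtain ⟨rank, hrank⟩ := hI.acyc
  exact rooted_exists_aux rank hI.rng hrank _ u hu (Nat.lt_succ_self _)

theorem reaches_conn {N : List Int} {P : List (Int × Int)} {arr : List Int} (hI : UFInv N P arr) {x y : Int}
    (hx : ValidI N.length x) (hr : ReachesA arr x y) :
    Conn P (valN N x) (valN N y) ∧ ValidI N.length y := by
  induction hr with
  | refl => exact ⟨Relation.ReflTransGen.refl, hx⟩
  | tail _ hstep ih =>
    rename_i b c _
    obtain ⟨hconn, hbv⟩ := ih
    have hsound := hI.sound b hbv
    rw [← hstep.2] at hsound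
    exact ⟨Relation.ReflTransGen.trans hconn hsound,
      hstep.2 ▸ hI.rng b hbv⟩

theorem sameRoot_conn {N : List Int} {P : List (Int × Int)} {arr : List Int} (hI : UFInv N P arr) {u v : Int}
    (hu : ValidI N.length u) (hv : ValidI N.length v) (hs : SameRoot arr u v) :
    Conn P (valN N u) (valN N v) := by
  obtain ⟨r, hur, hvr⟩ := hs
  have h1 := (reaches_conn hI hu hur.1).1
  have h2 := (reaches_conn hI hv hvr.1).1
  exact Relation.ReflTransGen.trans h1 (conn_symm h2)



def mcard (n : Nat) (rank : Int → Nat) (u : Int) : Nat :=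
  ((Finset.range n).filter (fun i : Nat => rank u < rank (i : Int))).card

theorem mcard_lt_of_rank_lt {n : Nat} {rank : Int → Nat} {u g : Int}
    (hg : ValidI n g) (hlt : rank u < rank g) : mcard n rank g < mcard n rank u := by
  obtain ⟨hg0, hg1⟩ := hg
  apply Finset.card_lt_card
  constructor
  · intro i hi
    rw [Finset.mem_filter] at hi ⊢
    exact ⟨hi.1, lt_trans hlt hi.2⟩
  · intro hsub
    have hmem : g.toNat ∈ (Finset.range n).filter (fun i : Nat => rank u < rank (i : Int)) :=
      Finset.mem_filter.2 ⟨Finset.mem_range.2 (by omega),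
        by rwa [Int.toNat_of_nonneg hg0]⟩
    have hbad := (Finset.mem_filter.1 (hsub hmem)).2
    rw [Int.toNat_of_nonneg hg0] at hbad
    exact lt_irrefl _ hbad

theorem mcard_lt_n {n : Nat} {rank : Int → Nat} {u : Int} (hu : ValidI n u) :
    mcard n rank u < n := by
  obtain ⟨hu0, hu1⟩ := hu
  have hssub : (Finset.range n).filter (fun i : Nat => rank u < rank (i : Int)) ⊂ Finset.range n := by
    constructor
    · exact Finset.filter_subset _ _
    · intro hsub
      have hmem := hsub (Finset.mem_range.2 (show u.toNat < n by omega))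
      have := (Finset.mem_filter.1 hmem).2
      rw [Int.toNat_of_nonneg hu0] at this
      exact lt_irrefl _ this
  have := Finset.card_lt_card hssub
  simpa using this

theorem reach_to_parent {arr : List Int} (w : Int) : ReachesA arr w (geta arr w) := by
  by_cases h : geta arr w = w
  · rw [h]
    exact Relation.ReflTransGen.refl
  · exact Relation.ReflTransGen.single ⟨h, rfl⟩

theorem rooted_head {arr : List Int} {x s : Int} (h : RootedAt arr x s)
    (hne : geta arr x ≠ x) : RootedAt arr (geta arr x) s := by
  obtain ⟨hc, hrep⟩ := h
  cases Relation.ReflTransGen.cases_head hc with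
  | inl heq => rw [← heq] at hrep; exact absurd hrep hne
  | inr h2 =>
    obtain ⟨y, hstep, htail⟩ := h2
    rw [← hstep.2]
    exact ⟨htail, hrep⟩

theorem geta_set {n : Nat} {arr : List Int} {u g w : Int}
    (hlen : arr.length = n) (hu : ValidI n u) (hw : ValidI n w) :
    geta (PySem.List.pySetD arr u g) w = if w = u then g else geta arr w := by
  obtain ⟨hu0, hu1⟩ := hu
  obtain ⟨hw0, hw1⟩ := hw
  rw [PySem.List.pySetD_of_nonneg arr g hu0]
  have hlset : (arr.set u.toNat g).length = arr.length := List.length_set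
  rw [geta, PySem.List.pyGetD_eq_getElem _ _ hw0 (by rw [hlset]; omega)]
  rw [List.getElem_set]
  by_cases hwu : w = u
  · simp [hwu]
  · have : u.toNat ≠ w.toNat := by omega
    simp only [this, if_neg, if_false]
    rw [if_neg hwu, geta, PySem.List.pyGetD_eq_getElem _ _ hw0 (by omega)]

-- the path-halving array update u ↦ geta (geta u) preserves all roots
theorem halve_spec {n : Nat} {arr : List Int} {rank : Int → Nat}
    (hlen : arr.length = n)
    (hrng : ∀ w, ValidI n w → ValidI n (geta arr w))
    (hrank : ∀ w, ValidI n w → geta arr w ≠ w → rank w < rank (geta arr w))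
    {u : Int} (hu : ValidI n u) (hne : geta arr u ≠ u) :
    let g := geta arr (geta arr u)
    let arr2 := PySem.List.pySetD arr u g
    arr2.length = n ∧
    (∀ w, ValidI n w → ValidI n (geta arr2 w)) ∧
    (∀ w, ValidI n w → geta arr2 w ≠ w → rank w < rank (geta arr2 w)) ∧
    rank u < rank (geta arr (geta arr u)) ∧
    ReachesA arr u (geta arr (geta arr u)) ∧
    (∀ x y, ValidI n x → ReachesA arr2 x y → ReachesA arr x y) ∧
    (∀ x s, ValidI n x → (RootedAt arr2 x s ↔ RootedAt arr x s)) := by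
  intro g arr2
  have hp1 : ValidI n (geta arr u) := hrng u hu
  have hg : ValidI n g := hrng _ hp1
  have hlen2 : arr2.length = n := by
    rw [show arr2 = PySem.List.pySetD arr u g from rfl,
      PySem.List.pySetD_of_nonneg arr g hu.1, List.length_set, hlen]
  have hget2 : ∀ w, ValidI n w → geta arr2 w = if w = u then g else geta arr w :=
    fun w hw => geta_set hlen hu hw
  have hrank_ug : rank u < rank g := by
    have h1 := hrank u hu hne
    by_cases h2 : geta arr (geta arr u) = geta arr u
    · rw [show g = geta arr (geta arr u) from rfl, h2]; exact h1
    · exact lt_trans h1 (hrank _ hp1 h2)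
  have hgu : g ≠ u := fun hgu => by rw [hgu] at hrank_ug; exact lt_irrefl _ hrank_ug
  have hreach_ug : ReachesA arr u g := by
    refine Relation.ReflTransGen.trans (Relation.ReflTransGen.single ⟨hne, rfl⟩) ?_
    exact reach_to_parent (geta arr u)
  have hrng2 : ∀ w, ValidI n w → ValidI n (geta arr2 w) := by
    intro w hw
    rw [hget2 w hw]
    by_cases hwu : w = u
    · simp [hwu]; exact hg
    · simp [hwu]; exact hrng w hw
  have hrank2 : ∀ w, ValidI n w → geta arr2 w ≠ w → rank w < rank (geta arr2 w) := by
    intro w hw hne2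
    rw [hget2 w hw] at hne2 ⊢
    by_cases hwu : w = u
    · simp [hwu] at hne2 ⊢; exact hrank_ug
    · simp [hwu] at hne2 ⊢; exact hrank w hw hne2
  have hvalid_chain : ∀ x y, ValidI n x → ReachesA arr2 x y → ValidI n y := by
    intro x y hx hr
    induction hr with
    | refl => exact hx
    | tail _ hstep ih =>
      exact hstep.2 ▸ hrng2 _ ih
  have hback : ∀ x y, ValidI n x → ReachesA arr2 x y → ReachesA arr x y := by
    intro x y hx hr
    induction hr with
    | refl => exact Relation.ReflTransGen.refl
    | tail hchain hstep ih =>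
      rename_i b c
      have hbv : ValidI n b := hvalid_chain x b hx hchain
      refine Relation.ReflTransGen.trans ih ?_
      obtain ⟨hne3, hceq⟩ := hstep
      rw [hget2 _ hbv] at hceq
      by_cases hbu : b = u
      · rw [if_pos hbu] at hceq
        rw [hceq, hbu]
        exact hreach_ug
      · rw [if_neg hbu] at hceq
        rw [hceq]
        exact reach_to_parent b
  have hrepiff : ∀ s, ValidI n s → (IsRep arr2 s ↔ IsRep arr s) := by
    intro s hs
    rw [IsRep, IsRep, hget2 s hs]
    by_cases hsu : s = u
    · subst hsu
      rw [if_pos rfl]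
      constructor
      · intro hgs; exact absurd hgs hgu
      · intro hgs; exact absurd hgs hne
    · rw [if_neg hsu]
  have hvalid_chainA : ∀ x y, ValidI n x → ReachesA arr x y → ValidI n y := by
    intro x y hx hr
    induction hr with
    | refl => exact hx
    | tail _ hstep ih =>
      exact hstep.2 ▸ hrng _ ih
  have hfwd : ∀ x s, ValidI n x → ReachesA arr x s → IsRep arr s → RootedAt arr2 x s := by
    intro x s hx hc
    revert hx
    induction hc using Relation.ReflTransGen.head_induction_on with
    | refl =>
      intro hx hrep
      exact ⟨Relation.ReflTransGen.refl, (hrepiff s hx).2 hrep⟩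
    | head hstep htail ih =>
      rename_i a b
      intro hav hrep
      obtain ⟨hne3, hbeq⟩ := hstep
      have hbv : ValidI n b := hbeq ▸ hrng a hav
      have hroot_b := ih hbv hrep
      by_cases hau : a = u
      · have hb : b = geta arr a := hbeq
        have hg_a : g = geta arr (geta arr a) := by rw [hau]
        have hstep_ag : StepA arr2 a g := by
          constructor
          · rw [hget2 a hav, if_pos hau]
            intro hh
            exact hgu (hh.trans hau)
          · rw [hget2 a hav, if_pos hau]
        by_cases hgp : geta arr (geta arr a) = geta arr a
        · -- g = geta arr a = b
          have hgb : g = b := by rw [hg_a, hgp]; exact hb.symm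
          rw [hgb] at hstep_ag
          exact ⟨Relation.ReflTransGen.head hstep_ag hroot_b.1, hroot_b.2⟩
        · -- two old steps collapse to the one new step a → g
          have hbnu : b ≠ u := by
            intro hbu
            exact hne3 (by rw [← hb, hbu, hau])
          have hgetb : geta arr2 b = g := by
            rw [hget2 b hbv, if_neg hbnu, hb, hg_a]
          have hgne : geta arr2 b ≠ b := by
            rw [hgetb, hg_a, hb]
            exact hgp
          have hroot_g : RootedAt arr2 g s := by
            have := rooted_head hroot_b hgne
            rwa [hgetb] at this
          exact ⟨Relation.ReflTransGen.head hstep_ag hroot_g.1, hroot_g.2⟩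
      · refine ⟨Relation.ReflTransGen.head ?_ hroot_b.1, hroot_b.2⟩
        constructor
        · rw [hget2 a hav, if_neg hau]
          exact hne3
        · rw [hget2 a hav, if_neg hau]
          exact hbeq
  refine ⟨hlen2, hrng2, hrank2, hrank_ug, hreach_ug, hback, ?_⟩
  intro x r hx
  constructor
  · intro h2
    exact ⟨hback x r hx h2.1, (hrepiff r (hvalid_chain x r hx h2.1)).1 h2.2⟩
  · intro h1
    exact hfwd x r hx h1.1 h1.2

theorem find_aux {n : Nat} (rank : Int → Nat) :
    ∀ (fuel : Nat) (arr : List Int) (u : Int),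
      arr.length = n →
      (∀ w, ValidI n w → ValidI n (geta arr w)) →
      (∀ w, ValidI n w → geta arr w ≠ w → rank w < rank (geta arr w)) →
      ValidI n u →
      mcard n rank u < fuel →
      ∃ arr' r, ufFind arr u fuel = (arr', r) ∧
        arr'.length = n ∧
        (∀ w, ValidI n w → ValidI n (geta arr' w)) ∧
        (∀ w, ValidI n w → geta arr' w ≠ w → rank w < rank (geta arr' w)) ∧
        RootedAt arr u r ∧ ValidI n r ∧
        (∀ w, ValidI n w → ReachesA arr w (geta arr' w)) ∧
        (∀ x s, ValidI n x → (RootedAt arr' x s ↔ RootedAt arr x s)) := by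
  intro fuel
  induction fuel with
  | zero => intro arr u _ _ _ _ hm; omega
  | succ fuel ih =>
    intro arr u hlen hrng hrank hu hm
    by_cases hne : geta arr u = u
    · refine ⟨arr, u, ?_, hlen, hrng, hrank, ⟨Relation.ReflTransGen.refl, hne⟩, hu, ?_, ?_⟩
      · rw [ufFind]
        rw [if_neg (by rw [show PySem.List.pyGetD arr u 0 = geta arr u from rfl, hne]; simp)]
      · intro w _; exact reach_to_parent w
      · intro x s _; exact Iff.rfl
    · have hsp := halve_spec hlen hrng hrank hu hne
      obtain ⟨hlen2, hrng2, hrank2, hrank_ug, hreach_ug, hback, hiffh⟩ := hsp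
      set g := geta arr (geta arr u) with hg
      set arr2 := PySem.List.pySetD arr u g with harr2
      have hgv : ValidI n g := hrng _ (hrng u hu)
      have hm2 : mcard n rank g < fuel := by
        have := mcard_lt_of_rank_lt hgv hrank_ug
        omega
      obtain ⟨arr', r, heq, hlen', hrng', hrank', hRoot2, hrv, hreach2, hiff2⟩ :=
        ih arr2 g hlen2 hrng2 hrank2 hgv hm2
      refine ⟨arr', r, ?_, hlen', hrng', hrank', ?_, hrv, ?_, ?_⟩
      · rw [ufFind, if_pos (by rw [show PySem.List.pyGetD arr u 0 = geta arr u from rfl]; simpa using hne)]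
        exact heq
      · have hg_r : RootedAt arr g r := (hiffh g r hgv).1 hRoot2
        exact ⟨Relation.ReflTransGen.trans hreach_ug hg_r.1, hg_r.2⟩
      · intro w hw
        exact hback w _ hw (hreach2 w hw)
      · intro x s hx
        exact (hiff2 x s hx).trans (hiffh x s hx)

-- specification of one (path-halving) find call
theorem find_spec {N : List Int} {P : List (Int × Int)} {arr : List Int} (hI : UFInv N P arr) {u : Int} (hu : ValidI N.length u) :
    ∃ arr' r, ufFind arr u arr.length = (arr', r) ∧
      UFInv N P arr' ∧ RootedAt arr u r ∧ ValidI N.length r ∧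
      arr'.length = arr.length ∧
      (∀ x s, ValidI N.length x → (RootedAt arr' x s ↔ RootedAt arr x s)) ∧
      (∀ x, ValidI N.length x → (IsRep arr' x ↔ IsRep arr x)) := by
  obtain ⟨rank, hrank⟩ := hI.acyc
  have hlen := hI.len
  have hm : mcard N.length rank u < arr.length := by
    rw [hlen]; exact mcard_lt_n hu
  obtain ⟨arr', r, heq, hlen', hrng', hrank', hRoot, hrv, hreach, hiff⟩ :=
    find_aux rank arr.length arr u hlen hI.rng hrank hu hm
  have hrepself : ∀ (a : List Int) (x : Int), IsRep a x ↔ RootedAt a x x :=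
    fun a x => ⟨fun h => ⟨Relation.ReflTransGen.refl, h⟩, fun h => h.2⟩
  refine ⟨arr', r, heq, ?_, hRoot, hrv, by rw [hlen', hlen], hiff, ?_⟩
  · refine ⟨hlen', hrng', ?_, ?_, hI.pvalid, ⟨rank, hrank'⟩⟩
    · intro w hw
      exact (reaches_conn hI hw (hreach w hw)).1
    · intro e he
      obtain ⟨pv1, pv2⟩ := hI.pvalid e he
      obtain ⟨r0, h1, h2⟩ := hI.compl e he
      exact ⟨r0, (hiff _ _ pv1).2 h1, (hiff _ _ pv2).2 h2⟩
  · intro x hx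
    rw [hrepself arr' x, hrepself arr x]
    exact hiff x x hx

theorem conn_mono {P Q : List (Int × Int)} {x y : Int} (hsub : ∀ e ∈ P, e ∈ Q)
    (h : Conn P x y) : Conn Q x y := by
  induction h with
  | refl => exact Relation.ReflTransGen.refl
  | tail _ hstep ih =>
    refine Relation.ReflTransGen.tail ih ?_
    cases hstep with
    | inl h1 => exact Or.inl (hsub _ h1)
    | inr h1 => exact Or.inr (hsub _ h1)

theorem countP_drop_one {p q : Nat → Bool} :
    ∀ (l : List Nat) (x : Nat), l.Nodup → x ∈ l → p x = true → q x = false →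
      (∀ y ∈ l, y ≠ x → p y = q y) → l.countP q + 1 = l.countP p := by
  intro l
  induction l with
  | nil => intro x _ hm; simp at hm
  | cons a rest ih =>
    intro x hnd hm hp hq hagree
    rw [List.countP_cons, List.countP_cons]
    rcases List.mem_cons.1 hm with rfl | hmem
    · have hrest : rest.countP q = rest.countP p := by
        apply List.countP_congr
        intro y hy
        have hyx : y ≠ x := by
          intro hyx
          rw [hyx] at hy
          simp at hnd
          exact hnd.1 hy
        rw [hagree y (List.mem_cons_of_mem _ hy) hyx]
      rw [hrest, hp, hq]
      simp
    · have hax : a ≠ x := by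
        intro hax
        simp at hnd
        rw [hax] at hnd
        exact hnd.1 hmem
      rw [hagree a (List.mem_cons_self) hax]
      have := ih x (by simp at hnd; exact hnd.2) hmem hp hq
        (fun y hy hyx => hagree y (List.mem_cons_of_mem _ hy) hyx)
      omega

theorem nreps_congr {a b : List Int} (hlen : a.length = b.length)
    (h : ∀ i : Int, ValidI a.length i → (IsRep a i ↔ IsRep b i)) : nreps a = nreps b := by
  rw [nreps, nreps, ← hlen]
  apply List.countP_congr
  intro i hi
  rw [List.mem_range] at hi
  have := h (i : Int) ⟨by omega, by omega⟩
  rw [IsRep, IsRep] at this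
  simp only [beq_iff_eq]
  simp [this]

theorem union_spec {E : List (Int × Int)} {N : List Int} {root : Int} {P : List (Int × Int)} {arr : List Int} (hc : Ctx E N root) (hI : UFInv N P arr)
    {p c : Int} (hp : p ∈ N) (hcm : c ∈ N) :
    ∃ arr2 ok, ufUnion arr (idxI N p) (idxI N c) = (arr2, ok) ∧
      UFInv N (P ++ [(p, c)]) arr2 ∧
      (ok = false → Conn P p c) ∧
      (ok = true → nreps arr2 + 1 = nreps arr) := by
  have hu : ValidI N.length (idxI N p) := idx_valid hp
  have hv : ValidI N.length (idxI N c) := idx_valid hcm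
  set u := idxI N p with hu_def
  set v := idxI N c with hv_def
  obtain ⟨arr_a, pu, heq1, hI_a, hRoot_u, hpuv, hlen_a, hiff_a, hfix_a⟩ := find_spec hI hu
  obtain ⟨arr_b, pv, heq2, hI_b, hRoot_v, hpvv, hlen_b, hiff_b, hfix_b⟩ := find_spec hI_a hv
  have hRoot_u_b : RootedAt arr_b u pu := (hiff_b u pu hu).2 ((hiff_a u pu hu).2 hRoot_u)
  have hRoot_v_b : RootedAt arr_b v pv := (hiff_b v pv hv).2 hRoot_v
  have hpu_rep : IsRep arr_b pu := hRoot_u_b.2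
  have hpv_rep : IsRep arr_b pv := hRoot_v_b.2
  have hval_u : valN N u = p := val_idx hc.nodup hp
  have hval_v : valN N v = c := val_idx hc.nodup hcm
  have hsub1 : ∀ e ∈ P, e ∈ P ++ [(p, c)] := fun e he => List.mem_append_left _ he
  have hnewadj : Adj (P ++ [(p, c)]) p c := Or.inl (List.mem_append_right _ (by simp))
  have hconn_up : Conn P (valN N u) (valN N pu) := (reaches_conn hI_b hu hRoot_u_b.1).1
  have hconn_vp : Conn P (valN N v) (valN N pv) := (reaches_conn hI_b hv hRoot_v_b.1).1
  have hueq : ufUnion arr u v = (if pu = pv then (arr_b, false)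
      else (PySem.List.pySetD arr_b pu pv, true)) := by
    simp only [ufUnion, heq1, heq2]
  by_cases hpp : pu = pv
  · refine ⟨arr_b, false, by rw [hueq, if_pos hpp], ?_, ?_, by simp⟩
    · refine ⟨hI_b.len, hI_b.rng, ?_, ?_, ?_, hI_b.acyc⟩
      · intro w hw
        exact conn_mono hsub1 (hI_b.sound w hw)
      · intro e he
        rcases List.mem_append.1 he with h1 | h1
        · exact hI_b.compl e h1
        · simp at h1
          rw [h1]
          exact ⟨pu, hRoot_u_b, hpp ▸ hRoot_v_b⟩
      · intro e he
        rcases List.mem_append.1 he with h1 | h1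
        · exact hI_b.pvalid e h1
        · simp at h1
          rw [h1]
          exact ⟨hu, hv⟩
    · intro _
      have hs : SameRoot arr_b u v := ⟨pu, hRoot_u_b, hpp ▸ hRoot_v_b⟩
      have := sameRoot_conn hI_b hu hv hs
      rwa [hval_u, hval_v] at this
  · -- successful union: arr2 = arr_b with pu ↦ pv
    set arr2 := PySem.List.pySetD arr_b pu pv with harr2
    have hlen_bn : arr_b.length = N.length := hI_b.len
    have hget2 : ∀ w, ValidI N.length w →
        geta arr2 w = if w = pu then pv else geta arr_b w :=
      fun w hw => geta_set hlen_bn hpuv hw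
    have hlen2 : arr2.length = N.length := by
      rw [harr2, PySem.List.pySetD_of_nonneg arr_b pv hpuv.1, List.length_set, hlen_bn]
    have hpv_rep2 : IsRep arr2 pv := by
      rw [IsRep, hget2 pv hpvv, if_neg (fun h => hpp h.symm)]
      exact hpv_rep
    -- every old chain survives, and roots move pu ↦ pv
    have hchain2 : ∀ x s, ValidI N.length x → ReachesA arr_b x s →
        ReachesA arr2 x s := by
      intro x s hx hr
      revert hx
      induction hr using Relation.ReflTransGen.head_induction_on with
      | refl => intro _; exact Relation.ReflTransGen.refl
      | head hstep htail ih =>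
        rename_i a b
        intro hav
        have hanp : a ≠ pu := by
          intro ha
          rw [ha] at hstep
          exact hstep.1 hpu_rep
        have hbv : ValidI N.length b := hstep.2 ▸ hI_b.rng a hav
        refine Relation.ReflTransGen.head ?_ (ih hbv)
        constructor
        · rw [hget2 a hav, if_neg hanp]
          exact hstep.1
        · rw [hget2 a hav, if_neg hanp]
          exact hstep.2
    have htrans : ∀ x s, ValidI N.length x → RootedAt arr_b x s →
        RootedAt arr2 x (if s = pu then pv else s) := by
      intro x s hx hr
      have hchain := hchain2 x s hx hr.1
      by_cases hsp : s = pu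
      · rw [if_pos hsp]
        subst hsp
        refine ⟨Relation.ReflTransGen.tail hchain ?_, hpv_rep2⟩
        constructor
        · rw [hget2 s hpuv, if_pos rfl]
          exact fun h => hpp h.symm
        · rw [hget2 s hpuv, if_pos rfl]
      · rw [if_neg hsp]
        refine ⟨hchain, ?_⟩
        have hsv : ValidI N.length s := (reaches_conn hI_b hx hr.1).2
        rw [IsRep, hget2 s hsv, if_neg hsp]
        exact hr.2
    have hInv2 : UFInv N (P ++ [(p, c)]) arr2 := by
      refine ⟨hlen2, ?_, ?_, ?_, ?_, ?_⟩
      · intro w hw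
        rw [hget2 w hw]
        by_cases hwp : w = pu
        · rw [if_pos hwp]; exact hpvv
        · rw [if_neg hwp]; exact hI_b.rng w hw
      · intro w hw
        rw [hget2 w hw]
        by_cases hwp : w = pu
        · rw [if_pos hwp, hwp]
          -- val pu ~ p ~ c ~ val pv inside P ++ [(p,c)]
          refine Relation.ReflTransGen.trans
            (conn_mono hsub1 (conn_symm (hval_u ▸ hconn_up))) ?_
          refine Relation.ReflTransGen.trans
            (Relation.ReflTransGen.single hnewadj) ?_
          exact conn_mono hsub1 (hval_v ▸ hconn_vp)
        · rw [if_neg hwp]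
          exact conn_mono hsub1 (hI_b.sound w hw)
      · intro e he
        rcases List.mem_append.1 he with h1 | h1
        · obtain ⟨pvd1, pvd2⟩ := hI_b.pvalid e h1
          obtain ⟨r0, hr1, hr2⟩ := hI_b.compl e h1
          exact ⟨if r0 = pu then pv else r0, htrans _ _ pvd1 hr1, htrans _ _ pvd2 hr2⟩
        · simp at h1
          rw [h1]
          refine ⟨pv, ?_, ?_⟩
          · have := htrans u pu hu hRoot_u_b
            rwa [if_pos rfl] at this
          · have := htrans v pv hv hRoot_v_b
            rwa [if_neg (fun h => hpp h.symm)] at this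
      · intro e he
        rcases List.mem_append.1 he with h1 | h1
        · exact hI_b.pvalid e h1
        · simp at h1
          rw [h1]
          exact ⟨hu, hv⟩
      · obtain ⟨rank, hrank⟩ := hI_b.acyc
        set M := ((Finset.range N.length).sup (fun i => rank (i : Int))) with hM
        refine ⟨fun z => if z = pv then M + 1 else rank z, ?_⟩
        intro w hw hne2
        show (if w = pv then M + 1 else rank w) <
          if geta arr2 w = pv then M + 1 else rank (geta arr2 w)
        have hrank_le : ∀ t : Int, ValidI N.length t → rank t ≤ M := by
          intro t ht
          have : t.toNat ∈ Finset.range N.length := Finset.mem_range.2 (by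
            obtain ⟨h1, h2⟩ := ht; omega)
          have hle := Finset.le_sup (f := fun i : Nat => rank (i : Int)) this
          simp only at hle
          rwa [Int.toNat_of_nonneg ht.1] at hle
        by_cases hwpv : w = pv
        · exfalso
          apply hne2
          rw [hget2 w hw, if_neg (by rw [hwpv]; exact fun h => hpp h.symm), hwpv]
          exact hpv_rep
        · rw [if_neg hwpv]
          by_cases hwp : w = pu
          · rw [hget2 w hw, if_pos hwp, if_pos rfl]
            have := hrank_le w hw
            omega
          · rw [hget2 w hw, if_neg hwp] at hne2 ⊢
            by_cases hgpv : geta arr_b w = pv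
            · rw [hgpv, if_pos rfl]
              have := hrank_le w hw
              omega
            · rw [if_neg hgpv]
              exact hrank w hw hne2
    refine ⟨arr2, true, by rw [hueq, if_neg hpp], hInv2, by simp, ?_⟩
    intro _
    -- counting: pu stops being a representative, everything else keeps its status
    have h1 : nreps arr = nreps arr_b := by
      refine (nreps_congr (by omega) ?_).symm
      intro i hi
      rw [hlen_bn] at hi
      exact ((hfix_b i hi).trans (hfix_a i hi))
    have h2 : nreps arr2 + 1 = nreps arr_b := by
      rw [nreps, nreps, hlen2, hlen_bn]
      apply countP_drop_one (List.range N.length) pu.toNat (List.nodup_range)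
        (List.mem_range.2 (by obtain ⟨hh1, hh2⟩ := hpuv; omega))
      · show (geta arr_b ((pu.toNat : Nat) : Int) == ((pu.toNat : Nat) : Int)) = true
        rw [Int.toNat_of_nonneg hpuv.1]
        simp only [beq_iff_eq]
        exact hpu_rep
      · show (geta arr2 ((pu.toNat : Nat) : Int) == ((pu.toNat : Nat) : Int)) = false
        rw [Int.toNat_of_nonneg hpuv.1]
        have hgot : geta arr2 pu = pv := by rw [hget2 pu hpuv, if_pos rfl]
        simp [hgot]
        exact fun h => hpp h.symm
      · intro y hy hyne
        rw [List.mem_range] at hy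
        have hyv : ValidI N.length (y : Int) := ⟨by omega, by omega⟩
        have hynp : (y : Int) ≠ pu := by
          intro h
          apply hyne
          rw [← h, Int.toNat_natCast]
        show (geta arr_b ((y : Nat) : Int) == ((y : Nat) : Int))
          = (geta arr2 ((y : Nat) : Int) == ((y : Nat) : Int))
        rw [hget2 _ hyv, if_neg hynp]
    omega

theorem enum_fold_untouched {v : Int} :
    ∀ (xs : List Int) (st : Int) (d : PySem.Dict Int Int), v ∉ xs →
      ((PySem.List.enumerate xs st).foldl (fun d iv => d.insert iv.2 iv.1) d).getD v 0 = d.getD v 0 := by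
  intro xs
  induction xs with
  | nil => intro st d _; rfl
  | cons x rest ih =>
    intro st d hv
    simp at hv
    rw [PySem.List.enumerate]
    simp only [List.foldl_cons]
    rw [ih _ _ hv.2, PySem.Dict.getD_insert_of_ne]
    intro hc
    first
      | exact hv.1 hc
      | exact hv.1 hc.symm

theorem enum_fold_getD {v : Int} :
    ∀ (xs : List Int) (st : Int) (d : PySem.Dict Int Int), xs.Nodup → v ∈ xs →
      ((PySem.List.enumerate xs st).foldl (fun d iv => d.insert iv.2 iv.1) d).getD v 0
        = st + (xs.idxOf v : Int) := by
  intro xs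
  induction xs with
  | nil => intro st d _ hm; simp at hm
  | cons x rest ih =>
    intro st d hnd hm
    rw [PySem.List.enumerate]
    simp only [List.foldl_cons]
    by_cases hvx : v = x
    · subst hvx
      rw [enum_fold_untouched rest _ _ (by simp at hnd; exact hnd.1),
        PySem.Dict.getD_insert_self, List.idxOf_cons_self]
      simp
    · rw [ih (st + 1) _ (by simp at hnd; exact hnd.2) (by
        rcases List.mem_cons.1 hm with h1 | h1
        · exact absurd h1 hvx
        · exact h1)]
      rw [List.idxOf_cons_ne _ (fun hc => hvx hc.symm)]
      push_cast
      ring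

theorem nidx_getD {E : List (Int × Int)} {N : List Int} {root : Int} (h : Ctx E N root) {v : Int} (hv : v ∈ N) :
    (buildIndexA N).getD v 0 = idxI N v := by
  rw [buildIndexA, enum_fold_getD N 0 _ h.nodup hv, idxI]
  simp

theorem loop_spec {E : List (Int × Int)} {N : List Int} {root : Int} (hc : Ctx E N root) :
    ∀ (rest P : List (Int × Int)) (arr : List Int), UFInv N P arr →
      (∀ e ∈ rest, e ∈ E) → (P ++ rest).length ≤ E.length →
      nreps arr + P.length = N.length →
      (match ufEdges (buildIndexA N) rest arr with
       | some arrF => UFInv N (P ++ rest) arrF ∧ nreps arrF + (P ++ rest).length = N.length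
       | none => ∃ Q e rest', rest = Q ++ e :: rest' ∧ Conn (P ++ Q) e.1 e.2) := by
  intro rest
  induction rest with
  | nil =>
    intro P arr hInv hsub hlen hnr
    simp only [ufEdges]
    exact ⟨by simpa using hInv, by simpa using hnr⟩
  | cons e rest' ih =>
    intro P arr hInv hsub hlen hnr
    obtain ⟨p, c⟩ := e
    have heE : (p, c) ∈ E := hsub _ (List.mem_cons_self)
    obtain ⟨he1, he2⟩ := ctx_edge_mem hc heE
    obtain ⟨arr2, ok, huf, hInv2, hfail, hsucc⟩ := union_spec hc hInv he1 he2
    simp only [ufEdges, nidx_getD hc he1, nidx_getD hc he2, huf]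
    cases ok with
    | false =>
      simp only [if_neg (by simp : ¬ (false = true))]
      exact ⟨[], (p, c), rest', by simp, by simpa using hfail rfl⟩
    | true =>
      simp only [if_pos rfl]
      have hsub' : ∀ e ∈ rest', e ∈ E := fun e he => hsub e (List.mem_cons_of_mem _ he)
      have hlen' : ((P ++ [(p, c)]) ++ rest').length ≤ E.length := by
        simp at hlen ⊢
        omega
      have hnr' : nreps arr2 + (P ++ [(p, c)]).length = N.length := by
        have := hsucc rfl
        simp
        omega
      have hres := ih (P ++ [(p, c)]) arr2 hInv2 hsub' hlen' hnr'
      cases hE : ufEdges (buildIndexA N) rest' arr2 with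
      | some arrF =>
        rw [hE] at hres
        refine ⟨?_, ?_⟩
        · have := hres.1
          rwa [List.append_assoc, List.singleton_append] at this
        · have := hres.2
          simp at this ⊢
          omega
      | none =>
        rw [hE] at hres
        obtain ⟨Q, e2, rest'', hsplit, hconn⟩ := hres
        refine ⟨(p, c) :: Q, e2, rest'', by rw [hsplit]; simp, ?_⟩
        rwa [List.append_assoc, List.singleton_append] at hconn

theorem check_spec {N : List Int} {P : List (Int × Int)} {arrF : List Int} (hI : UFInv N P arrF) {rep : Int}
    (hrep : ∀ i : Int, ValidI N.length i → RootedAt arrF i rep) :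
    ∀ (l : List Int) (arr : List Int), UFInv N P arr →
      (∀ x s, ValidI N.length x → (RootedAt arr x s ↔ RootedAt arrF x s)) →
      (∀ i ∈ l, ValidI N.length i) →
      ufCheck rep arr l = true := by
  intro l
  induction l with
  | nil => intro arr _ _ _; rfl
  | cons i rest ih =>
    intro arr hInv hiff hl
    have hiv := hl i (List.mem_cons_self)
    obtain ⟨arr', r, hfind, hInv', hRoot, hrv, hlen, hiff', hfix⟩ := find_spec hInv hiv
    have hrF : RootedAt arrF i r := (hiff i r hiv).1 hRoot
    have hreq : r = rep := root_unique hrF (hrep i hiv)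
    rw [ufCheck, hfind]
    simp only [hreq]
    simp
    exact ih arr' hInv' (fun x s hx => (hiff' x s hx).trans (hiff x s hx)) 
      (fun j hj => hl j (List.mem_cons_of_mem _ hj))

theorem length_range_n (n : Nat) : (PySem.List.pyRange 0 (n : Int) 1).length = n := by
  rw [PySem.List.length_pyRange_one]; omega

theorem geta_range {n : Nat} {u : Int} (hu : ValidI n u) :
    geta (PySem.List.pyRange 0 (n : Int) 1) u = u := by
  obtain ⟨hu0, hu1⟩ := hu
  have h2 : u < ((PySem.List.pyRange 0 (n : Int) 1).length : Int) := by
    rw [length_range_n]; exact hu1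
  rw [geta, PySem.List.pyGetD_eq_getElem _ _ hu0 h2, PySem.List.getElem_pyRange_one]
  omega

theorem arr0_inv {E : List (Int × Int)} {N : List Int} {root : Int} (h : Ctx E N root) :
    UFInv N [] (PySem.List.pyRange 0 (N.length : Int) 1) ∧
    nreps (PySem.List.pyRange 0 (N.length : Int) 1) = N.length := by
  constructor
  · refine ⟨length_range_n _, ?_, ?_, ?_, ?_, ?_⟩
    · intro u hu; rw [geta_range hu]; exact hu
    · intro u hu; rw [geta_range hu]; exact Relation.ReflTransGen.refl
    · intro e he; simp at he
    · intro e he; simp at he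
    · exact ⟨fun _ => 0, fun u hu hne => absurd (geta_range hu) hne⟩
  · rw [nreps, length_range_n]
    have hall : ∀ i ∈ List.range N.length,
        (geta (PySem.List.pyRange 0 (N.length : Int) 1) (i : Int) == (i : Int)) = true := by
      intro i hi
      rw [List.mem_range] at hi
      have : geta (PySem.List.pyRange 0 (N.length : Int) 1) (i : Int) = (i : Int) :=
        geta_range ⟨by omega, by omega⟩
      simp [this]
    rw [List.countP_eq_length.2 hall, List.length_range]

theorem nreps_one_unique {arr : List Int} (h1 : nreps arr = 1) {r r' : Int}
    (hr : ValidI arr.length r) (hr' : ValidI arr.length r')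
    (h2 : IsRep arr r) (h3 : IsRep arr r') : r = r' := by
  rw [nreps, List.countP_eq_length_filter] at h1
  obtain ⟨z, hz⟩ := List.length_eq_one_iff.1 h1
  have hmem : ∀ t : Int, ValidI arr.length t → IsRep arr t →
      t.toNat ∈ (List.range arr.length).filter (fun i : Nat => geta arr (i : Int) == (i : Int)) := by
    intro t ht hrep
    obtain ⟨ht0, ht1⟩ := ht
    rw [List.mem_filter, List.mem_range]
    refine ⟨by omega, ?_⟩
    simp [Int.toNat_of_nonneg ht0]
    exact hrep
  have hz1 := hmem r hr h2
  have hz2 := hmem r' hr' h3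
  rw [hz] at hz1 hz2
  simp at hz1 hz2
  obtain ⟨hr0, _⟩ := hr
  obtain ⟨hr'0, _⟩ := hr'
  omega

-- ---------- the core equivalence of the two final phases ----------

theorem uf_eq_walk {E : List (Int × Int)} {N : List Int} {root : Int} (hc : Ctx E N root) (d : PySem.Dict Int Int)
    (hd : ∀ v ∈ N, v ≠ root → ∀ p, parOf E v = some p → d.getD v 0 = p) :
    (match ufEdges (buildIndexA N) E (PySem.List.pyRange 0 (N.length : Int) 1) with
     | none => false
     | some arr1 =>
       let f0 := ufFind arr1 0 arr1.length
       ufCheck f0.2 f0.1 (PySem.List.pyRange 1 (N.length : Int) 1)) =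
    N.all (fun v => walkB d root v N.length == root) := by
  have hn1 : 1 ≤ N.length := List.length_pos_of_mem hc.rootmem
  obtain ⟨hInv0, hnr0⟩ := arr0_inv hc
  have hloop := loop_spec hc E [] _ hInv0 (fun e he => he) (by simp) (by simpa using hnr0)
  cases hE : ufEdges (buildIndexA N) E (PySem.List.pyRange 0 (N.length : Int) 1) with
  | none =>
    rw [hE] at hloop
    obtain ⟨Q, e, rest', hsplit, hconn⟩ := hloop
    have hnall : ¬ (∀ v ∈ N, ReachE E root v) := by
      intro hall
      refine no_early_conn hc hall (P := Q) (p := e.1) (c := e.2) ?_ ?_ ?_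
        (by simpa using hconn)
      · intro e' he'
        rw [hsplit]
        exact List.mem_append_left _ he'
      · rw [hsplit]
        exact List.mem_append_right _ (by cases e; exact List.mem_cons_self)
      · intro e' he'
        have hnd := ctx_chd_nodup hc
        rw [hsplit] at hnd
        have : chd (Q ++ e :: rest') = chd Q ++ e.2 :: chd rest' := by
          simp [chd]
        rw [this] at hnd
        have hnotin : e.2 ∉ chd Q := by
          intro hmem
          exact (List.disjoint_of_nodup_append hnd) hmem (by simp)
        intro heq
        exact hnotin (heq ▸ mem_chd.2 ⟨e', he', rfl⟩)
    push_neg at hnall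
    obtain ⟨v, hvN, hvnr⟩ := hnall
    symm
    rw [List.all_eq_false]
    refine ⟨v, hvN, ?_⟩
    simp only [beq_iff_eq]
    intro hwalk
    obtain ⟨k, _, hk⟩ := (walk_eq_root_iff hc d hd N.length v hvN).1 hwalk
    exact hvnr ⟨k, hk⟩
  | some arrF =>
    rw [hE] at hloop
    have hInvF : UFInv N E arrF := by simpa using hloop.1
    have hnrF : nreps arrF = 1 := by
      have h2 := hloop.2
      simp at h2
      have h3 := hc.hn
      omega
    have hvalid0 : ValidI N.length (0 : Int) := ⟨le_refl 0, by exact_mod_cast hn1⟩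
    obtain ⟨arrA, rep0, heqf, hInvA, hRoot0, hrep0v, hlenA, hiffA, hfixA⟩ :=
      find_spec hInvF hvalid0
    have hallroot : ∀ i : Int, ValidI N.length i → RootedAt arrF i rep0 := by
      intro i hi
      obtain ⟨r, hr, hrv⟩ := rooted_exists hInvF hi
      have hlenF := hInvF.len
      have hreq : r = rep0 := by
        refine nreps_one_unique hnrF ?_ ?_ hr.2 hRoot0.2
        · rw [hlenF]; exact hrv
        · rw [hlenF]; exact hrep0v
      exact hreq ▸ hr
    have hcheck : ufCheck rep0 arrA (PySem.List.pyRange 1 (N.length : Int) 1) = true := by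
      refine check_spec hInvF hallroot _ arrA hInvA hiffA ?_
      intro i hi
      rw [PySem.List.mem_pyRange_one] at hi
      exact ⟨by omega, by omega⟩
    simp only [heqf, hcheck]
    symm
    rw [List.all_eq_true]
    intro v hvN
    have hsame : SameRoot arrF (idxI N v) (idxI N root) :=
      ⟨rep0, hallroot _ (idx_valid hvN), hallroot _ (idx_valid hc.rootmem)⟩
    have hconn : Conn E v root := by
      have := sameRoot_conn hInvF (idx_valid hvN) (idx_valid hc.rootmem) hsame
      rwa [val_idx hc.nodup hvN, val_idx hc.nodup hc.rootmem] at this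
    have hreach := conn_reach hc hconn
    obtain ⟨k, hk, hik⟩ := reach_bounded hc hvN hreach
    simp only [beq_iff_eq]
    exact (walk_eq_root_iff hc d hd N.length v hvN).2 ⟨k, hk, hik⟩

-- ---------- prefix computations agree ----------

theorem selfLoopA_eq_any (l : List (Int × Int)) :
    selfLoopA l = l.any (fun e => e.1 = e.2) := by
  induction l with
  | nil => rfl
  | cons e rest ih => by_cases h : e.1 = e.2 <;> simp [selfLoopA, h, ih]

theorem degChkA_eq_all (deg : PySem.Dict Int Int) (root : Int) (l : List Int) :
    degChkA deg root l = l.all (fun v => decide (v = root ∨ deg.getD v 0 = 1)) := by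
  induction l with
  | nil => rfl
  | cons v rest ih =>
    by_cases h1 : v = root
    · simp [degChkA, h1, ih]
    · by_cases h2 : deg.getD v 0 = 1 <;> simp [degChkA, h1, h2, ih]

def setOfE (E : List (Int × Int)) : PySem.Set Int :=
  E.foldl (fun s e => PySem.Set.add (PySem.Set.add s e.1) e.2) PySem.Set.empty

theorem buildA_eq (E : List (Int × Int)) :
    buildA E = (setOfE E, E.foldl (fun d e => d.modify e.2 0 (· + 1)) PySem.Dict.empty) := by
  unfold buildA setOfE
  exact foldl_pair (fun (s : PySem.Set Int) (e : Int × Int) => PySem.Set.add (PySem.Set.add s e.1) e.2)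
    (fun (d : PySem.Dict Int Int) (e : Int × Int) => d.modify e.2 0 (· + 1)) E _ _

theorem buildB_eq (E : List (Int × Int)) :
    buildB E = (setOfE E,
      E.foldl (fun d e => d.insert e.2 (d.getD e.2 0 + 1)) PySem.Dict.empty,
      E.foldl (fun d e => d.insert e.2 e.1) PySem.Dict.empty) := by
  unfold buildB setOfE
  have h := foldl_pair (C := Int × Int)
      (fun (s : PySem.Set Int) e => PySem.Set.add (PySem.Set.add s e.1) e.2)
      (fun (st : PySem.Dict Int Int × PySem.Dict Int Int) e =>
        (st.1.insert e.2 (st.1.getD e.2 0 + 1), st.2.insert e.2 e.1))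
      E PySem.Set.empty (PySem.Dict.empty, PySem.Dict.empty)
  rw [h]
  have h2 := foldl_pair (C := Int × Int)
      (fun (d : PySem.Dict Int Int) e => d.insert e.2 (d.getD e.2 0 + 1))
      (fun (d : PySem.Dict Int Int) e => d.insert e.2 e.1)
      E PySem.Dict.empty PySem.Dict.empty
  rw [h2]

theorem degA_getD (E : List (Int × Int)) (v : Int) :
    (E.foldl (fun d e => d.modify e.2 0 (· + 1)) PySem.Dict.empty).getD v 0 = (degE E v : Int) := by
  rw [← List.foldl_map (f := Prod.snd) (g := fun (d : PySem.Dict Int Int) (x : Int) => d.modify x 0 (· + 1)) (l := E) (init := PySem.Dict.empty),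
      PySem.Dict.getD_foldl_modify_add_one]
  simp [degE, chd]

theorem degB_getD (E : List (Int × Int)) (v : Int) :
    (E.foldl (fun d e => d.insert e.2 (d.getD e.2 0 + 1)) PySem.Dict.empty).getD v 0 = (degE E v : Int) := by
  rw [← List.foldl_map (f := Prod.snd) (g := fun (d : PySem.Dict Int Int) (x : Int) => d.insert x (d.getD x 0 + 1)) (l := E) (init := PySem.Dict.empty),
      PySem.Dict.getD_foldl_insert_add_one]
  simp [degE, chd]

theorem setOf_fold_nodup :
    ∀ (l : List (Int × Int)) (s : PySem.Set Int), s.Nodup →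
      (l.foldl (fun s e => PySem.Set.add (PySem.Set.add s e.1) e.2) s).Nodup := by
  intro l
  induction l with
  | nil => intro s hs; exact hs
  | cons e rest ih =>
    intro s hs
    refine ih _ ?_
    apply PySem.Set.nodup_add
    apply PySem.Set.nodup_add
    exact hs

theorem setOfE_nodup (E : List (Int × Int)) : (setOfE E).Nodup := by
  exact setOf_fold_nodup E _ List.nodup_nil

theorem setOf_fold_mem (v : Int) :
    ∀ (l : List (Int × Int)) (s : PySem.Set Int),
      (v ∈ l.foldl (fun s e => PySem.Set.add (PySem.Set.add s e.1) e.2) s ↔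
        v ∈ s ∨ ∃ e ∈ l, e.1 = v ∨ e.2 = v) := by
  intro l
  induction l with
  | nil => intro s; simp
  | cons e rest ih =>
    intro s
    rw [List.foldl_cons, ih]
    simp [PySem.Set.mem_add, eq_comm]
    constructor
    · rintro (((h | h) | h) | ⟨a, b, hab, hor⟩)
      · exact Or.inl h
      · exact Or.inr ⟨e.1, e.2, Or.inl (by cases e; rfl), Or.inl h⟩
      · exact Or.inr ⟨e.1, e.2, Or.inl (by cases e; rfl), Or.inr h⟩
      · exact Or.inr ⟨a, b, Or.inr hab, hor⟩
    · rintro (h | ⟨a, b, heq | hmemr, hor⟩)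
      · exact Or.inl (Or.inl (Or.inl h))
      · rcases hor with h1 | h1
        · exact Or.inl (Or.inl (Or.inr (by rw [heq]; exact h1)))
        · exact Or.inl (Or.inr (by rw [heq]; exact h1))
      · exact Or.inr ⟨a, b, hmemr, hor⟩

theorem mem_setOfE (E : List (Int × Int)) (v : Int) :
    v ∈ setOfE E ↔ ∃ e ∈ E, e.1 = v ∨ e.2 = v := by
  rw [setOfE, setOf_fold_mem]
  simp

theorem all_congr {α : Type} (l : List α) (f g : α → Bool)
    (h : ∀ x ∈ l, f x = g x) : l.all f = l.all g := by
  induction l with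
  | nil => rfl
  | cons x rest ih =>
    simp only [List.all_cons]
    rw [h x (List.mem_cons_self), ih (fun y hy => h y (List.mem_cons_of_mem _ hy))]

-- the else-branches of the two ports, verbatim
def tailA (pairs : List (Int × Int)) : Bool :=
  if selfLoopA pairs then false
  else
    let st := buildA pairs
    if PySem.Set.len st.1 ≠ pairs.length + 1 then false
    else
      let roots := st.1.filter (fun v => st.2.getD v 0 = 0)
      if roots.length ≠ 1 then false
      else
        let root := PySem.List.pyGetD roots 0 0
        if degChkA st.2 root st.1 then
          let nidx := buildIndexA st.1
          let arr0 := PySem.List.pyRange 0 (PySem.Set.len st.1 : Int) 1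
          match ufEdges nidx pairs arr0 with
          | none => false
          | some arr1 =>
            let f0 := ufFind arr1 0 arr1.length
            ufCheck f0.2 f0.1 (PySem.List.pyRange 1 (PySem.Set.len st.1 : Int) 1)
        else false

def tailB (pairs : List (Int × Int)) : Bool :=
  if pairs.any (fun e => e.1 = e.2) then false
  else
    let st := buildB pairs
    if PySem.Set.len st.1 ≠ pairs.length + 1 then false
    else
      let roots := st.1.filter (fun v => st.2.1.getD v 0 = 0)
      if roots.length ≠ 1 then false
      else
        let root := PySem.List.pyGetD roots 0 0
        if st.1.all (fun v => decide (v = root ∨ st.2.1.getD v 0 = 1)) then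
          st.1.all (fun v => walkB st.2.2 root v (PySem.Set.len st.1).toNat == root)
        else false

theorem solve_eq (a : List Int) (size : Int) :
    solve a size =
      (if size = 0 then false
       else if PySem.Int.mod size 2 ≠ 0 then false
       else
         let pairs := (PySem.List.pyRange 0 size 2).map
           (fun i => (PySem.List.pyGetD a i 0, PySem.List.pyGetD a (i + 1) 0))
         if pairs.length = 1 then
           let e := PySem.List.pyGetD pairs 0 (0, 0)
           if e.1 = e.2 then true else true
         else tailA pairs) := rfl

theorem solve_alt_eq (a : List Int) (size : Int) :
    solve_alt a size =
      (if size = 0 then false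
       else if PySem.Int.mod size 2 ≠ 0 then false
       else
         let pairs := (PySem.List.pyRange 0 size 2).map
           (fun i => (PySem.List.pyGetD a i 0, PySem.List.pyGetD a (i + 1) 0))
         if pairs.length = 1 then
           let e := PySem.List.pyGetD pairs 0 (0, 0)
           decide (e.1 ≠ e.2)
         else tailB pairs) := rfl

theorem set_len_eq (s : PySem.Set Int) : PySem.Set.len s = (s.length : Int) := by
  simp [PySem.Set.len]

theorem tail_eq (E : List (Int × Int)) : tailA E = tailB E := by
  rw [tailA, tailB, selfLoopA_eq_any, buildA_eq, buildB_eq]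
  by_cases h1 : E.any (fun e => e.1 = e.2)
  · rw [if_pos h1, if_pos h1]
  · rw [if_neg h1, if_neg h1]
    simp only
    set N := setOfE E with hN
    have hfilt : N.filter
        (fun v => (E.foldl (fun (d : PySem.Dict Int Int) e => d.modify e.2 0 (· + 1)) PySem.Dict.empty).getD v 0 = 0)
        = N.filter (fun v => ((degE E v : Int)) = 0) :=
      List.filter_congr (fun v _ => by rw [degA_getD E v])
    have hfiltB : N.filter
        (fun v => (E.foldl (fun (d : PySem.Dict Int Int) e => d.insert e.2 (d.getD e.2 0 + 1)) PySem.Dict.empty).getD v 0 = 0)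
        = N.filter (fun v => ((degE E v : Int)) = 0) :=
      List.filter_congr (fun v _ => by rw [degB_getD E v])
    rw [hfilt, hfiltB]
    by_cases h2 : PySem.Set.len N ≠ (E.length : Int) + 1
    · rw [if_pos h2, if_pos h2]
    · rw [if_neg h2, if_neg h2]
      set roots := N.filter (fun v => ((degE E v : Int)) = 0) with hroots
      by_cases h3 : roots.length ≠ 1
      · rw [if_pos h3, if_pos h3]
      · rw [if_neg h3, if_neg h3]
        set root := PySem.List.pyGetD roots 0 0 with hroot
        rw [degChkA_eq_all]
        have hchk : N.all (fun v =>
            decide (v = root ∨ (E.foldl (fun (d : PySem.Dict Int Int) e => d.modify e.2 0 (· + 1)) PySem.Dict.empty).getD v 0 = 1))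
            = N.all (fun v => decide (v = root ∨ (degE E v : Int) = 1)) :=
          all_congr _ _ _ (fun v _ => by rw [degA_getD E v])
        have hchkB : N.all (fun v =>
            decide (v = root ∨ (E.foldl (fun (d : PySem.Dict Int Int) e => d.insert e.2 (d.getD e.2 0 + 1)) PySem.Dict.empty).getD v 0 = 1))
            = N.all (fun v => decide (v = root ∨ (degE E v : Int) = 1)) :=
          all_congr _ _ _ (fun v _ => by rw [degB_getD E v])
        rw [hchk, hchkB]
        by_cases h4 : N.all (fun v => decide (v = root ∨ (degE E v : Int) = 1)) = true
        · rw [if_pos h4, if_pos h4]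
          -- all prefix checks passed: build the context and apply the core theorem
          push_neg at h2
          rw [not_not] at h3
          have hlenN : N.length = E.length + 1 := by
            rw [set_len_eq] at h2
            exact_mod_cast h2
          obtain ⟨r1, hr1⟩ := List.length_eq_one_iff.1 h3
          have hrooteq : root = r1 := by rw [hroot, hr1]; rfl
          have hr1mem : r1 ∈ roots := by rw [hr1]; exact List.mem_cons_self
          have hr1N : r1 ∈ N := (List.mem_filter.1 (hroots ▸ hr1mem)).1
          have hr1deg : degE E r1 = 0 := by
            have := (List.mem_filter.1 (hroots ▸ hr1mem)).2
            simp at this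
            exact_mod_cast this
          have hctx : Ctx E N root := by
            refine ⟨setOfE_nodup E, fun v => mem_setOfE E v, hlenN, ?_, ?_, ?_, ?_, ?_⟩
            · intro e he
              intro heq
              have : ¬ E.any (fun e => e.1 = e.2) = true := h1
              rw [List.any_eq_true] at this
              push_neg at this
              exact absurd (by simpa using heq) (by simpa using this e he)
            · rw [hrooteq]; exact hr1N
            · rw [hrooteq]; exact hr1deg
            · intro v hv hvr
              have := List.all_eq_true.1 h4 v hv
              simp at this
              rcases this with heq | hdeg
              · exact absurd heq hvr
              · exact_mod_cast hdeg
            · intro v hv hdv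
              have hvroots : v ∈ roots := by
                rw [hroots]
                exact List.mem_filter.2 ⟨hv, by simp [hdv]⟩
              rw [hr1] at hvroots
              simp at hvroots
              rw [hrooteq]
              exact hvroots
          have hwalkd := uf_eq_walk hctx
            (E.foldl (fun (d : PySem.Dict Int Int) e => d.insert e.2 e.1) PySem.Dict.empty)
            (fun v hv hvr p hp => buildB_parent_getD hctx (mem_of_par hp))
          rw [set_len_eq]
          simp only [Int.toNat_natCast]
          exact hwalkd
        · rw [if_neg h4, if_neg h4]

-- ===== VERDICT (by name: the statement is the Claim_ definition above) =====
theorem solve_spec : Claim_unchanged_solve := by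
  intro a size hdom hpre hnd
  rw [solve_eq, solve_alt_eq]
  by_cases h0 : size = 0
  · rw [if_pos h0, if_pos h0]
  · rw [if_neg h0, if_neg h0]
    by_cases h1 : PySem.Int.mod size 2 ≠ 0
    · rw [if_pos h1, if_pos h1]
    · rw [if_neg h1, if_neg h1]
      simp only
      set pairs := (PySem.List.pyRange 0 size 2).map
        (fun i => (PySem.List.pyGetD a i 0, PySem.List.pyGetD a (i + 1) 0)) with hpairs
      by_cases h2 : pairs.length = 1
      · rw [if_pos h2, if_pos h2]
        rw [not_not] at h1
        have hmod : size % 2 = 0 := by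
          rw [PySem.Int.mod_eq_emod_of_pos (by omega : (0:Int) < 2)] at h1
          exact h1
        have hlen1 : (PySem.List.pyRange 0 size 2).length = 1 := by
          rw [hpairs, List.length_map] at h2
          exact h2
        have hs2 : size = 2 := by
          by_contra hne
          by_cases hsp : size ≤ 0
          · have : PySem.List.pyRange 0 size 2 = [] := by
              rw [List.eq_nil_iff_forall_not_mem]
              intro x hx
              rw [PySem.List.mem_pyRange_iff_of_pos (by omega)] at hx
              omega
            rw [this] at hlen1
            simp at hlen1
          · by_cases hs4 : 4 ≤ size
            · obtain ⟨z, hz⟩ := List.length_eq_one_iff.1 hlen1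
              have hm0 : (0 : Int) ∈ PySem.List.pyRange 0 size 2 := by
                rw [PySem.List.mem_pyRange_iff_of_pos (by omega)]
                refine ⟨le_refl _, by omega, by simp⟩
              have hm2 : (2 : Int) ∈ PySem.List.pyRange 0 size 2 := by
                rw [PySem.List.mem_pyRange_iff_of_pos (by omega)]
                refine ⟨by omega, by omega, by simp⟩
              rw [hz] at hm0 hm2
              simp at hm0 hm2
              omega
            · omega
        have hlen2 : 2 ≤ a.length := by
          have := hpre h1 (by omega)
          rw [hs2] at this
          omega
        have hrange : PySem.List.pyRange 0 size 2 = [0] := by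
          rw [hs2]
          decide
        have hne3 : a.getD 0 0 ≠ a.getD 1 0 := by
          intro heq
          exact hnd ⟨hs2, hlen2, heq⟩
        have hpairs1 : pairs = [(PySem.List.pyGetD a 0 0, PySem.List.pyGetD a (0 + 1) 0)] := by
          rw [hpairs, hrange]
          simp
        rw [hpairs1]
        rw [PySem.List.pyGetD_zero_cons]
        have hget0 : PySem.List.pyGetD a 0 0 = a.getD 0 0 := PySem.List.pyGetD_zero a 0
        have hget1 : PySem.List.pyGetD a (0 + 1) 0 = a.getD 1 0 := by
          rw [show ((0 : Int) + 1) = 1 by omega]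
          exact PySem.List.pyGetD_ofNat' a 1 0
        simp only [hget0, hget1]
        rw [List.getD_eq_getElem?_getD, List.getD_eq_getElem?_getD] at hne3
        simp [hne3]
      · rw [if_neg h2, if_neg h2]
        exact tail_eq pairs
theorem solve_changed : Claim_changed_solve := by
  unfold Claim_changed_solve; decide
theorem solve_tight : Claim_exact_solve := by
  intro a size hdom hpre hD
  obtain ⟨hs2, hlen2, heq⟩ := hD
  subst hs2
  rw [solve_eq, solve_alt_eq]
  rw [if_neg (by omega : ¬ (2 : Int) = 0), if_neg (by omega : ¬ (2 : Int) = 0)]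
  rw [if_neg (by decide : ¬ PySem.Int.mod 2 2 ≠ 0), if_neg (by decide : ¬ PySem.Int.mod 2 2 ≠ 0)]
  simp only
  have hrange : PySem.List.pyRange 0 2 2 = [(0 : Int)] := by decide
  rw [hrange]
  simp only [List.map_cons, List.map_nil, List.length_cons, List.length_nil]
  rw [if_pos trivial, if_pos trivial]
  simp only [List.map_cons, List.map_nil, PySem.List.pyGetD_zero_cons]
  have hget0 : PySem.List.pyGetD a 0 0 = a.getD 0 0 := PySem.List.pyGetD_zero a 0
  have hget1 : PySem.List.pyGetD a (0 + 1) 0 = a.getD 1 0 := by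
    rw [show ((0 : Int) + 1) = 1 by omega]
    exact PySem.List.pyGetD_ofNat' a 1 0
  simp only [hget0, hget1]
  rw [List.getD_eq_getElem?_getD, List.getD_eq_getElem?_getD] at heq
  simp [heq]
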